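-- pv_equiv track=rewrite | github.com/Polonimos-404/Solution-of-Eight-Puzzle-Problem-based-on-A-Star-Algorithm | check.py | inv_num
-- ===== SOURCE A (Python) =====
-- def inv_num(arr: list):
--     res = 0
--     for i in range(1, len(arr)):
--         if arr[i] > 0:
--             for j in range(i):
--                 if arr[j] > arr[i]:
--                     res += 1
--     return res
-- ===== SOURCE B (Python) =====
-- def inv_num(arr: list):
--     # A pair counts iff the later element y > 0 and the earlier element x > y;
--     # then x > y > 0, so both are positive: the answer is the inversion count of
--     # the subsequence of positive elements, computed by merge sort in O(n log n).
--     def sort_count(l):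
--         if len(l) < 2:
--             return l, 0
--         m = len(l) // 2
--         left, c1 = sort_count(l[:m])
--         right, c2 = sort_count(l[m:])
--         merged = []
--         i = j = c3 = 0
--         while i < len(left) and j < len(right):
--             if left[i] <= right[j]:
--                 merged.append(left[i])
--                 i += 1
--             else:
--                 merged.append(right[j])
--                 c3 += len(left) - i
--                 j += 1
--         merged.extend(left[i:])
--         merged.extend(right[j:])
--         return merged, c1 + c2 + c3
--
--     return sort_count([x for x in arr if x > 0])[1]
-- ===== Notes on version B (the rewrite author's own statement) =====
-- stated objective: faster
-- what changed: A's counted pairs force both elements positive, so B filters the positive elements once and counts inversions of that subsequence with a merge-sort inversion counter instead of A's nested index scan.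
import Mathlib
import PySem

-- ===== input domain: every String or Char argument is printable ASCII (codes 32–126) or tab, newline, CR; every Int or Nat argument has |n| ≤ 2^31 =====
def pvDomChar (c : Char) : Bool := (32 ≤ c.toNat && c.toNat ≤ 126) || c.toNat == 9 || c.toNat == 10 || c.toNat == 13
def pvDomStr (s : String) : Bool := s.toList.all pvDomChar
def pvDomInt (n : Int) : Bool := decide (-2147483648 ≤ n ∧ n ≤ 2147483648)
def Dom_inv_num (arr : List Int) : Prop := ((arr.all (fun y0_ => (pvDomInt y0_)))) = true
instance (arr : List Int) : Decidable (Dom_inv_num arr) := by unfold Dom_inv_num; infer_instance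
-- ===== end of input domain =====

-- B filters the positive elements (every counted pair has both elements positive) and counts
-- inversions of that subsequence with a merge-sort counter: O(n log n) instead of A's O(n^2).


-- ===== PORT A =====
def inv_num (arr : List Int) : Int :=
  (PySem.List.pyRange 1 arr.length).foldl (fun res i =>
    if 0 < PySem.List.pyGetD arr i 0 then
      (PySem.List.pyRange 0 i).foldl (fun r j =>
        if PySem.List.pyGetD arr i 0 < PySem.List.pyGetD arr j 0 then r + 1 else r) res
    else res) 0

-- ===== PORT B =====
-- merge step of Source B's sort_count: returns (merged list, c3), c3 += len(left) - i on a right take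
def mergeCnt : List Int → List Int → List Int × Int
  | [], b => (b, 0)
  | a, [] => (a, 0)
  | x :: a, y :: b =>
    if x ≤ y then
      (x :: (mergeCnt a (y :: b)).1, (mergeCnt a (y :: b)).2)
    else
      (y :: (mergeCnt (x :: a) b).1, (mergeCnt (x :: a) b).2 + ((x :: a).length : Int))
termination_by a b => a.length + b.length

-- sort_count of Source B
def sortCnt (l : List Int) : List Int × Int :=
  if _h : l.length < 2 then (l, 0)
  else
    let m := l.length / 2
    let p1 := sortCnt (l.take m)
    let p2 := sortCnt (l.drop m)
    let p3 := mergeCnt p1.1 p2.1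
    (p3.1, p1.2 + p2.2 + p3.2)
termination_by l.length
decreasing_by
  · simp; omega
  · simp; omega

def inv_num_alt (arr : List Int) : Int :=
  (sortCnt (arr.filter (fun x => 0 < x))).2

-- ===== PRECONDITION & SPEC =====
def Spec_inv_num (arr : List Int) (out : Int) : Prop := out = inv_num_alt arr
instance (arr : List Int) (out : Int) : Decidable (Spec_inv_num arr out) := by unfold Spec_inv_num; infer_instance

-- ===== CLAIM (what is proved, stated in full; the proofs are below) =====
def Claim_equal_inv_num : Prop := ∀ (arr : List Int), Dom_inv_num arr → Spec_inv_num arr (inv_num arr)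

-- ===== LEMMAS AND PROOFS =====

-- inversion count of a list (head-based recursion)
def invc : List Int → Int
  | [] => 0
  | x :: xs => ((xs.countP (fun y => decide (y < x)) : Nat) : Int) + invc xs

-- cross inversions: pairs (x from a, y from b) with y < x
def cross (a b : List Int) : Int :=
  (a.map (fun x => ((b.countP (fun y => decide (y < x)) : Nat) : Int))).sum

-- the pair count of A, element-structured (earlier element first)
def navc : List Int → Int
  | [] => 0
  | x :: xs => ((xs.countP (fun y => decide (0 < y ∧ y < x)) : Nat) : Int) + navc xs

theorem cross_nil_right (a : List Int) : cross a [] = 0 := by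
  simp [cross]

theorem cross_cons_left (x : Int) (a b : List Int) :
    cross (x :: a) b = ((b.countP (fun y => decide (y < x)) : Nat) : Int) + cross a b := by
  simp [cross]

theorem cross_cons_right (a : List Int) (y : Int) (b : List Int) :
    cross a (y :: b) = ((a.countP (fun z => decide (y < z)) : Nat) : Int) + cross a b := by
  induction a with
  | nil => simp [cross]
  | cons x a ih =>
    rw [cross_cons_left, cross_cons_left, ih]
    simp only [List.countP_cons]
    by_cases h : y < x
    · have h2 : decide (y < x) = true := by simpa using h
      simp only [h2, if_true]; push_cast; ring
    · have h2 : decide (y < x) = false := by simpa using h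
      simp only [h2, Bool.false_eq_true, if_false]; push_cast; ring

theorem cross_perm_left {a a' : List Int} (p : a.Perm a') (b : List Int) :
    cross a b = cross a' b :=
  List.Perm.sum_eq (p.map _)

theorem cross_perm_right (a : List Int) {b b' : List Int} (p : b.Perm b') :
    cross a b = cross a b' := by
  unfold cross
  congr 1
  exact List.map_congr_left (fun x _ => by rw [p.countP_eq])

theorem invc_append (a b : List Int) : invc (a ++ b) = invc a + invc b + cross a b := by
  induction a with
  | nil => simp [invc, cross]
  | cons x a ih =>
    simp only [List.cons_append, invc, ih, cross_cons_left, List.countP_append]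
    push_cast; ring

theorem mergeCnt_perm (a b : List Int) : (mergeCnt a b).1.Perm (a ++ b) := by
  fun_induction mergeCnt a b with
  | case1 b => simp
  | case2 a _ => simp
  | case3 x a y b hxy ih =>
    simpa using (List.Perm.cons x ih)
  | case4 x a y b hxy ih =>
    exact (List.Perm.cons y ih).trans (List.perm_middle).symm

theorem mergeCnt_sorted {a b : List Int} (ha : a.Pairwise (· ≤ ·)) (hb : b.Pairwise (· ≤ ·)) :
    (mergeCnt a b).1.Pairwise (· ≤ ·) := by
  fun_induction mergeCnt a b with
  | case1 b => simpa using hb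
  | case2 a _ => simpa using ha
  | case3 x a y b hxy ih =>
    simp only at ih ⊢
    rw [List.pairwise_cons] at ha
    refine List.pairwise_cons.mpr ⟨?_, ih ha.2 hb⟩
    intro z hz
    have hz' := (mergeCnt_perm a (y :: b)).mem_iff.mp hz
    rcases List.mem_append.mp hz' with h | h
    · exact ha.1 z h
    · rcases List.mem_cons.mp h with rfl | h
      · exact hxy
      · rw [List.pairwise_cons] at hb
        exact hxy.trans (hb.1 z h)
  | case4 x a y b hxy ih =>
    simp only at ih ⊢
    rw [List.pairwise_cons] at hb
    refine List.pairwise_cons.mpr ⟨?_, ih ha hb.2⟩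
    intro z hz
    have hz' := (mergeCnt_perm (x :: a) b).mem_iff.mp hz
    have hyx : y ≤ x := le_of_lt (lt_of_not_ge hxy)
    rcases List.mem_append.mp hz' with h | h
    · rcases List.mem_cons.mp h with rfl | h
      · exact hyx
      · rw [List.pairwise_cons] at ha
        exact hyx.trans (ha.1 z h)
    · exact hb.1 z h

theorem mergeCnt_count {a b : List Int} (ha : a.Pairwise (· ≤ ·)) (hb : b.Pairwise (· ≤ ·)) :
    (mergeCnt a b).2 = cross a b := by
  fun_induction mergeCnt a b with
  | case1 b => simp [cross]
  | case2 a _ => simp [cross_nil_right]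
  | case3 x a y b hxy ih =>
    simp only at ih ⊢
    rw [List.pairwise_cons] at ha
    rw [cross_cons_left, ih ha.2 hb]
    have hc : (y :: b).countP (fun z => decide (z < x)) = 0 := by
      rw [List.countP_eq_zero]
      intro z hz
      rcases List.mem_cons.mp hz with rfl | h
      · simpa using not_lt.mpr hxy
      · rw [List.pairwise_cons] at hb
        simpa using not_lt.mpr (hxy.trans (hb.1 z h))
    rw [hc]; simp
  | case4 x a y b hxy ih =>
    simp only at ih ⊢
    rw [List.pairwise_cons] at hb
    rw [cross_cons_right, ih ha hb.2]
    have hyx : y < x := lt_of_not_ge hxy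
    have hc : (x :: a).countP (fun z => decide (y < z)) = (x :: a).length := by
      rw [List.countP_eq_length]
      intro z hz
      rcases List.mem_cons.mp hz with rfl | h
      · simpa using hyx
      · rw [List.pairwise_cons] at ha
        simpa using hyx.trans_le (ha.1 z h)
    rw [hc]; ring

theorem sortCnt_correct (l : List Int) :
    (sortCnt l).1.Perm l ∧ (sortCnt l).1.Pairwise (· ≤ ·) ∧ (sortCnt l).2 = invc l := by
  fun_induction sortCnt l with
  | case1 l h =>
    refine ⟨List.Perm.refl l, ?_, ?_⟩
    · match l, h with
      | [], _ => simp
      | [x], _ => simp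
    · match l, h with
      | [], _ => rfl
      | [x], _ => simp [invc]
  | case2 l h m p1 p2 p3 ih1 ih2 =>
    simp only [p3, p1, p2, m] at ih1 ih2 ⊢
    obtain ⟨hp1, hs1, hc1⟩ := ih1
    obtain ⟨hp2, hs2, hc2⟩ := ih2
    refine ⟨?_, ?_, ?_⟩
    · have htd : l.take m ++ l.drop m = l := List.take_append_drop m l
      refine (mergeCnt_perm _ _).trans ((hp1.append hp2).trans ?_)
      rw [htd]
    · exact mergeCnt_sorted hs1 hs2
    · rw [mergeCnt_count hs1 hs2, hc1, hc2]
      rw [cross_perm_left hp1, cross_perm_right _ hp2]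
      have := invc_append (l.take m) (l.drop m)
      rw [List.take_append_drop] at this
      rw [this]

-- navc counts exactly the inversions of the positive subsequence
theorem navc_eq_invc_filter (l : List Int) :
    navc l = invc (l.filter (fun x => decide (0 < x))) := by
  induction l with
  | nil => rfl
  | cons x xs ih =>
    by_cases hx : 0 < x
    · rw [List.filter_cons_of_pos (by simpa using hx)]
      simp only [navc, invc, ih, List.countP_filter]
      congr 2
      apply List.countP_congr
      intro y _
      by_cases h : y < x <;> by_cases h0 : 0 < y <;> simp [h, h0]
    · rw [List.filter_cons_of_neg (by simpa using hx)]
      simp only [navc, ih]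
      have hc : xs.countP (fun y => decide (0 < y ∧ y < x)) = 0 := by
        rw [List.countP_eq_zero]
        intro y _
        simp only [decide_eq_true_eq, not_and]
        intro h0 hy
        exact hx (h0.trans hy)
      rw [hc]; simp

-- appending one element to navc adds its pairs as latest element
theorem navc_append_singleton (l : List Int) (x : Int) :
    navc (l ++ [x]) = navc l +
      (if 0 < x then ((l.countP (fun z => decide (x < z)) : Nat) : Int) else 0) := by
  induction l with
  | nil => simp [navc]
  | cons y l ih =>
    simp only [List.cons_append, navc, ih, List.countP_append, List.countP_cons,
      List.countP_nil]
    by_cases hx : 0 < x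
    · by_cases hxy : x < y
      · simp [hx, hxy]; ring
      · simp [hx, hxy]; ring
    · simp [hx]

-- A's inner loop over range(i) counts the earlier elements greater than v
theorem inner_loop_eq (l : List Int) (x v res : Int) :
    (PySem.List.pyRange 0 (l.length : Int)).foldl
      (fun r j => if v < PySem.List.pyGetD (l ++ [x]) j 0 then r + 1 else r) res =
    res + ((l.countP (fun z => decide (v < z)) : Nat) : Int) := by
  have hcongr : (PySem.List.pyRange 0 (l.length : Int)).foldl
      (fun r j => if v < PySem.List.pyGetD (l ++ [x]) j 0 then r + 1 else r) res =
      (PySem.List.pyRange 0 (l.length : Int)).foldl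
      (fun r j => if v < PySem.List.pyGetD l j 0 then r + 1 else r) res := by
    apply PySem.List.foldl_congr_mem
    intro acc j hj
    rw [PySem.List.mem_pyRange_one] at hj
    rw [PySem.List.pyGetD_eq_getElem _ _ hj.1 (by simp; omega),
        PySem.List.pyGetD_eq_getElem _ _ hj.1 (by omega)]
    congr 1
    rw [List.getElem_append_left]
  rw [hcongr]
  have h := PySem.List.foldl_pyRange_zero_pyGetD l 0
    (fun r z => if v < z then r + 1 else r) res
  simp only [PySem.List.len] at h
  rw [h]
  rw [show (fun (r z : Int) => if v < z then r + 1 else r)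
        = (fun (r : Int) (z : Int) => if (fun z => decide (v < z)) z = true then r + 1 else r) by
      funext r z; by_cases hz : v < z <;> simp [hz]]
  rw [PySem.List.foldl_count_if (fun z => decide (v < z)) l res]

-- A's fold, step by step from the back, computes navc
theorem inv_num_eq_navc (arr : List Int) : inv_num arr = navc arr := by
  induction arr using List.reverseRecOn with
  | nil => rfl
  | append_singleton l x ih =>
    by_cases hl : l = []
    · subst hl
      simp only [inv_num]
      rw [PySem.List.pyRange_one_eq_nil (by simp)]
      simp [navc]
    · have hn : 1 ≤ (l.length : Int) := by
        have : 0 < l.length := List.length_pos_iff.mpr hl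
        omega
      have hlen : ((l ++ [x]).length : Int) = (l.length : Int) + 1 := by simp
      unfold inv_num
      rw [hlen, PySem.List.pyRange_one_succ_right hn, List.foldl_append]
      have hcongr : (PySem.List.pyRange 1 (l.length : Int)).foldl
          (fun res i => if 0 < PySem.List.pyGetD (l ++ [x]) i 0 then
            (PySem.List.pyRange 0 i).foldl (fun r j =>
              if PySem.List.pyGetD (l ++ [x]) i 0 < PySem.List.pyGetD (l ++ [x]) j 0
              then r + 1 else r) res else res) (0 : Int) =
          (PySem.List.pyRange 1 (l.length : Int)).foldl
          (fun res i => if 0 < PySem.List.pyGetD l i 0 then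
            (PySem.List.pyRange 0 i).foldl (fun r j =>
              if PySem.List.pyGetD l i 0 < PySem.List.pyGetD l j 0
              then r + 1 else r) res else res) (0 : Int) := by
        apply PySem.List.foldl_congr_mem
        intro acc i hi
        rw [PySem.List.mem_pyRange_one] at hi
        have hi0 : (0:Int) ≤ i := by omega
        have hgi : PySem.List.pyGetD (l ++ [x]) i 0 = PySem.List.pyGetD l i 0 := by
          rw [PySem.List.pyGetD_eq_getElem _ _ hi0 (by simp; omega),
              PySem.List.pyGetD_eq_getElem _ _ hi0 (by omega)]
          rw [List.getElem_append_left]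
        rw [hgi]
        by_cases hpos : 0 < PySem.List.pyGetD l i 0
        · rw [if_pos hpos, if_pos hpos]
          apply PySem.List.foldl_congr_mem
          intro r j hj
          rw [PySem.List.mem_pyRange_one] at hj
          have hgj : PySem.List.pyGetD (l ++ [x]) j 0 = PySem.List.pyGetD l j 0 := by
            rw [PySem.List.pyGetD_eq_getElem _ _ hj.1 (by simp; omega),
                PySem.List.pyGetD_eq_getElem _ _ hj.1 (by omega)]
            rw [List.getElem_append_left]
          rw [hgj]
        · rw [if_neg hpos, if_neg hpos]
      rw [hcongr]
      have hinv : (PySem.List.pyRange 1 (l.length : Int)).foldl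
          (fun res i => if 0 < PySem.List.pyGetD l i 0 then
            (PySem.List.pyRange 0 i).foldl (fun r j =>
              if PySem.List.pyGetD l i 0 < PySem.List.pyGetD l j 0
              then r + 1 else r) res else res) (0 : Int) = inv_num l := by
        unfold inv_num; rfl
      rw [hinv, ih, navc_append_singleton]
      have hgx : PySem.List.pyGetD (l ++ [x]) (l.length : Int) 0 = x := by
        rw [PySem.List.pyGetD_eq_getElem _ _ (by omega) (by simp)]
        simp
      rw [List.foldl_cons, List.foldl_nil, hgx]
      by_cases hx : 0 < x
      · rw [if_pos hx, if_pos hx, inner_loop_eq]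
      · rw [if_neg hx, if_neg hx, add_zero]

-- ===== VERDICT (by name: the statement is the Claim_ definition above) =====
theorem inv_num_spec : Claim_equal_inv_num := by
  intro arr _
  show inv_num arr = inv_num_alt arr
  rw [inv_num_eq_navc, navc_eq_invc_filter]
  unfold inv_num_alt
  exact ((sortCnt_correct (arr.filter (fun x => decide (0 < x)))).2.2).symm
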